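-- pv_equiv track=rewrite | github.com/LA3D/three-layer-agent | fitness_coach/methodology.py | _build_daniels_suggestion
-- ===== SOURCE A (Python) =====
-- MAX_MILEAGE_PROGRESSION_PCT_PER_WEEK = 10.0
--
-- EASY_RUN_FRACTION_FLOOR = 0.80  # 80/20 rule: ≥80% of mileage should be easy/recovery
--
-- MIN_RUNS_PER_RUNNER_WEEK = 3
--
-- def _build_daniels_suggestion(violations: list[str]) -> str:
--     """Tailor a `suggested_adjustment` for the Daniels methodology."""
--     parts: list[str] = []
--     if any("contains no RunActivity" in v for v in violations):
--         parts.append("Daniels methodology is run-only; include RunActivity entries")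
--     if any("Easy/recovery mileage" in v for v in violations):
--         parts.append(f"Maintain ≥{EASY_RUN_FRACTION_FLOOR:.0%} easy/recovery distribution (80/20 rule)")
--     if any("exceeds" in v and "cap" in v for v in violations):
--         parts.append(
--             f"Cap weekly mileage at +{MAX_MILEAGE_PROGRESSION_PCT_PER_WEEK:.0f}% over current"
--         )
--     if any("at least" in v and "RunActivity" in v for v in violations):
--         parts.append(
--             f"A runner session is a full training week — include at least "
--             f"{MIN_RUNS_PER_RUNNER_WEEK} distinct runs distributed across the week"
--         )
--     if any("halted for this session" in v for v in violations):
--         parts.append("Drop or substitute halted activities")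
--     return "; ".join(parts) or "Address the violations listed above"
-- ===== SOURCE B (Python) =====
-- MAX_MILEAGE_PROGRESSION_PCT_PER_WEEK = 10.0
-- EASY_RUN_FRACTION_FLOOR = 0.80
-- MIN_RUNS_PER_RUNNER_WEEK = 3
--
-- def _build_daniels_suggestion(violations: list[str]) -> str:
--     """Tailor a `suggested_adjustment` for the Daniels methodology."""
--     no_run = easy_mix = cap = min_runs = halted = False
--     for v in violations:
--         no_run = no_run or "contains no RunActivity" in v
--         easy_mix = easy_mix or "Easy/recovery mileage" in v
--         cap = cap or ("exceeds" in v and "cap" in v)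
--         min_runs = min_runs or ("at least" in v and "RunActivity" in v)
--         halted = halted or "halted for this session" in v
--     parts: list[str] = []
--     if no_run:
--         parts.append("Daniels methodology is run-only; include RunActivity entries")
--     if easy_mix:
--         parts.append(f"Maintain ≥{EASY_RUN_FRACTION_FLOOR:.0%} easy/recovery distribution (80/20 rule)")
--     if cap:
--         parts.append(f"Cap weekly mileage at +{MAX_MILEAGE_PROGRESSION_PCT_PER_WEEK:.0f}% over current")
--     if min_runs:
--         parts.append(
--             f"A runner session is a full training week — include at least "
--             f"{MIN_RUNS_PER_RUNNER_WEEK} distinct runs distributed across the week"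
--         )
--     if halted:
--         parts.append("Drop or substitute halted activities")
--     return "; ".join(parts) or "Address the violations listed above"
-- ===== Notes on version B (the rewrite author's own statement) =====
-- stated objective: alternative
-- what changed: Replaces five separate any(...) scans over the violation list with a single pass that accumulates five boolean flags, then assembles the parts list from the flags in the same fixed order.
import Mathlib
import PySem

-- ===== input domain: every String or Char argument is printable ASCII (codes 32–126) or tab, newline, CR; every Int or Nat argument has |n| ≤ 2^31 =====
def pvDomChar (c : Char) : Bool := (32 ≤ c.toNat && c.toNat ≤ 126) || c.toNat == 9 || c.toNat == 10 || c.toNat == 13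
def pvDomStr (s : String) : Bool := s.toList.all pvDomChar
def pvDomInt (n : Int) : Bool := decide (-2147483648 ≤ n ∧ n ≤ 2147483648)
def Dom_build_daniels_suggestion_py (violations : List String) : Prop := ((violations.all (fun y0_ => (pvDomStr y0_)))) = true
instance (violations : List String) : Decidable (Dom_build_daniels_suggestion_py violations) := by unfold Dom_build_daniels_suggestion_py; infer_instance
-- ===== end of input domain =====

-- B replaces A's five separate any(...) scans by one single-pass loop accumulating five
-- boolean flags, then assembles the parts in the same fixed order (objective: alternative).


-- ===== PORT A =====
-- literal port of A: five any(...) comprehension scans, then "; ".join(parts) or fallback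
def build_daniels_suggestion_py (violations : List String) : String :=
  let parts : List String := []
  let parts := if violations.any (fun v => PySem.Str.isIn "contains no RunActivity" v) then
      parts ++ ["Daniels methodology is run-only; include RunActivity entries"] else parts
  let parts := if violations.any (fun v => PySem.Str.isIn "Easy/recovery mileage" v) then
      parts ++ ["Maintain ≥80% easy/recovery distribution (80/20 rule)"] else parts
  let parts := if violations.any (fun v => PySem.Str.isIn "exceeds" v && PySem.Str.isIn "cap" v) then
      parts ++ ["Cap weekly mileage at +10% over current"] else parts
  let parts := if violations.any (fun v => PySem.Str.isIn "at least" v && PySem.Str.isIn "RunActivity" v) then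
      parts ++ ["A runner session is a full training week — include at least 3 distinct runs distributed across the week"] else parts
  let parts := if violations.any (fun v => PySem.Str.isIn "halted for this session" v) then
      parts ++ ["Drop or substitute halted activities"] else parts
  let joined := PySem.Str.join "; " parts
  if joined = "" then "Address the violations listed above" else joined

-- ===== PORT B =====
-- B's single pass: fold over the list OR-ing the five substring tests into five flags
def bdsFlags (violations : List String) : Bool × Bool × Bool × Bool × Bool :=
  violations.foldl
    (fun st v =>
      (st.1 || PySem.Str.isIn "contains no RunActivity" v,
       st.2.1 || PySem.Str.isIn "Easy/recovery mileage" v,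
       st.2.2.1 || (PySem.Str.isIn "exceeds" v && PySem.Str.isIn "cap" v),
       st.2.2.2.1 || (PySem.Str.isIn "at least" v && PySem.Str.isIn "RunActivity" v),
       st.2.2.2.2 || PySem.Str.isIn "halted for this session" v))
    (false, false, false, false, false)

def build_daniels_suggestion_py_alt (violations : List String) : String :=
  let fl := bdsFlags violations
  let parts : List String := []
  let parts := if fl.1 then parts ++ ["Daniels methodology is run-only; include RunActivity entries"] else parts
  let parts := if fl.2.1 then parts ++ ["Maintain ≥80% easy/recovery distribution (80/20 rule)"] else parts
  let parts := if fl.2.2.1 then parts ++ ["Cap weekly mileage at +10% over current"] else parts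
  let parts := if fl.2.2.2.1 then parts ++ ["A runner session is a full training week — include at least 3 distinct runs distributed across the week"] else parts
  let parts := if fl.2.2.2.2 then parts ++ ["Drop or substitute halted activities"] else parts
  let joined := PySem.Str.join "; " parts
  if joined = "" then "Address the violations listed above" else joined

-- ===== PRECONDITION & SPEC =====
def Spec_build_daniels_suggestion_py (violations : List String) (out : String) : Prop := out = build_daniels_suggestion_py_alt violations
instance (violations : List String) (out : String) : Decidable (Spec_build_daniels_suggestion_py violations out) := by unfold Spec_build_daniels_suggestion_py; infer_instance

-- ===== CLAIM (what is proved, stated in full; the proofs are below) =====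
def Claim_equal_build_daniels_suggestion_py : Prop := ∀ (violations : List String), Dom_build_daniels_suggestion_py violations → Spec_build_daniels_suggestion_py violations (build_daniels_suggestion_py violations)

-- ===== LEMMAS AND PROOFS =====

-- the single-pass fold computes exactly the five any-scans
theorem bdsFlags_eq_any (violations : List String) :
    bdsFlags violations =
      (violations.any (fun v => PySem.Str.isIn "contains no RunActivity" v),
       violations.any (fun v => PySem.Str.isIn "Easy/recovery mileage" v),
       violations.any (fun v => PySem.Str.isIn "exceeds" v && PySem.Str.isIn "cap" v),
       violations.any (fun v => PySem.Str.isIn "at least" v && PySem.Str.isIn "RunActivity" v),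
       violations.any (fun v => PySem.Str.isIn "halted for this session" v)) := by
  unfold bdsFlags
  suffices h : ∀ (l : List String) (st : Bool × Bool × Bool × Bool × Bool),
      l.foldl
        (fun st v =>
          (st.1 || PySem.Str.isIn "contains no RunActivity" v,
           st.2.1 || PySem.Str.isIn "Easy/recovery mileage" v,
           st.2.2.1 || (PySem.Str.isIn "exceeds" v && PySem.Str.isIn "cap" v),
           st.2.2.2.1 || (PySem.Str.isIn "at least" v && PySem.Str.isIn "RunActivity" v),
           st.2.2.2.2 || PySem.Str.isIn "halted for this session" v)) st =
      (st.1 || l.any (fun v => PySem.Str.isIn "contains no RunActivity" v),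
       st.2.1 || l.any (fun v => PySem.Str.isIn "Easy/recovery mileage" v),
       st.2.2.1 || l.any (fun v => PySem.Str.isIn "exceeds" v && PySem.Str.isIn "cap" v),
       st.2.2.2.1 || l.any (fun v => PySem.Str.isIn "at least" v && PySem.Str.isIn "RunActivity" v),
       st.2.2.2.2 || l.any (fun v => PySem.Str.isIn "halted for this session" v)) by
    simpa using h violations (false, false, false, false, false)
  intro l
  induction l with
  | nil => intro st; simp
  | cons x xs ih =>
      intro st
      simp only [List.foldl_cons]
      rw [ih]
      simp [List.any_cons, Bool.or_assoc]

-- ===== VERDICT (by name: the statement is the Claim_ definition above) =====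
theorem build_daniels_suggestion_py_spec : Claim_equal_build_daniels_suggestion_py := by
  intro violations _
  unfold Spec_build_daniels_suggestion_py build_daniels_suggestion_py build_daniels_suggestion_py_alt
  rw [bdsFlags_eq_any]
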